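-- pv_equiv track=rewrite | github.com/bbelderbos/aoc | day06/script.py | check_infinite_loop
-- ===== SOURCE A (Python) =====
-- from enum import Enum
-- from itertools import cycle
-- from typing import NamedTuple
--
-- class Direction(Enum):
--     NORTH = (-1, 0)
--     EAST = (0, 1)
--     SOUTH = (1, 0)
--     WEST = (0, -1)
--
-- class Position(NamedTuple):
--     x: int
--     y: int
--
-- def check_infinite_loop(grid: list[list[str]], start: Position) -> bool:
--     directions = cycle([d.value for d in Direction])
--     direction = next(directions)
--
--     #pp(grid)
--     i, j = start
--     visited_states = set()
--
--     while True:
--         current_state = (Position(i, j), direction)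
--         if current_state in visited_states:
--             return True  # A true infinite loop is detected
--         visited_states.add(current_state)
--
--         next_pos = Position(i + direction[0], j + direction[1])
--
--         try:
--             if grid[next_pos.x][next_pos.y] in ("#", "O"):
--                 direction = next(directions)
--                 continue
--         except IndexError:
--             return False  # The guard exits the grid, so no loop
--
--         i, j = next_pos
-- ===== SOURCE B (Python) =====
-- def check_infinite_loop(grid, start):
--     # Bounded simulation: the guard's state space (position x direction) is finite,
--     # so if the walk survives more steps than there are states it must repeat one,
--     # i.e. it loops forever.  No visited set is kept: O(1) extra space.
--     rows = len(grid)
--     cols = max((len(row) for row in grid), default=0)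
--     limit = 4 * (2 * rows + 1) * (2 * cols + 1) + 1
--     i, j = start
--     di, dj = -1, 0  # facing north
--     for _ in range(limit):
--         ni, nj = i + di, j + dj
--         try:
--             blocked = grid[ni][nj] in ("#", "O")
--         except IndexError:
--             return False  # the guard walks off the grid
--         if blocked:
--             di, dj = dj, -di  # turn right
--         else:
--             i, j = ni, nj
--     return True  # survived more steps than distinct states: a loop
-- ===== Notes on version B (the rewrite author's own statement) =====
-- stated objective: alternative
-- what changed: Replaces the visited-state hash set with a bounded simulation: since the guard's reachable state space (position x direction) is finite, running the step rule for more iterations than there are states proves a loop by pigeonhole, so B keeps O(1) extra state instead of a set of O(cells*4) states.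
import Mathlib
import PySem

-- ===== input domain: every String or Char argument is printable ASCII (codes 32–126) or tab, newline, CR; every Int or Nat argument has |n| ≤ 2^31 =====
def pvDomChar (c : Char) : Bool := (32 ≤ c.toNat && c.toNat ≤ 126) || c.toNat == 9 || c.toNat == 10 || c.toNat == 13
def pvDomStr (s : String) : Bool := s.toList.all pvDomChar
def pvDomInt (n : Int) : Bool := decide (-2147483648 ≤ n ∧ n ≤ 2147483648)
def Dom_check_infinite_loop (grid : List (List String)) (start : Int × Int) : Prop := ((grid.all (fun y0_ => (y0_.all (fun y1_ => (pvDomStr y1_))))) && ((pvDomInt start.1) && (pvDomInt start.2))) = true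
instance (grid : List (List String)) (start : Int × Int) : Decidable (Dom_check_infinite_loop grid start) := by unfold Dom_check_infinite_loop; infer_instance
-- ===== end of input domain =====

-- B replaces A's visited-state hash set by a bounded simulation (pigeonhole on the finite
-- state space), keeping O(1) extra state; same return value, proved equal below.

-- max row length and the step bound 4*(2*rows+1)*(2*cols+1)+1 used by B (and, as a
-- proven-sufficient fuel, by the termination device of A's port).
def pvCols (grid : List (List String)) : Nat := (grid.map List.length).foldl max 0
def pvLimit (grid : List (List String)) : Nat :=
  4 * (2 * grid.length + 1) * (2 * pvCols grid + 1) + 1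

-- ===== PORT A =====
-- `cycle([d.value for d in Direction])`: successor in the 4-cycle NORTH→EAST→SOUTH→WEST→NORTH
def pvNextDir (d : Int × Int) : Int × Int :=
  if d = (-1, 0) then (0, 1)
  else if d = (0, 1) then (1, 0)
  else if d = (1, 0) then (0, -1)
  else (-1, 0)

-- A's `while True` loop with its visited set.  The fuel only makes the recursion
-- structural: the proofs below show it never runs out (a state must repeat first).
def pvLoopA (grid : List (List String)) :
    Nat → PySem.Set ((Int × Int) × (Int × Int)) → Int × Int → Int × Int → Bool
  | 0, _, _, _ => true  -- unreachable (pigeonhole, proved below)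
  | fuel + 1, visited, pos, dir =>
    if PySem.Set.contains visited (pos, dir) then true
    else
      let visited' := PySem.Set.add visited (pos, dir)
      match PySem.List.pyGet? grid (pos.1 + dir.1) with
      | none => false  -- IndexError: the guard exits the grid
      | some row =>
        match PySem.List.pyGet? row (pos.2 + dir.2) with
        | none => false  -- IndexError on the row
        | some cell =>
          if cell = "#" ∨ cell = "O" then
            pvLoopA grid fuel visited' pos (pvNextDir dir)  -- turn, continue
          else
            pvLoopA grid fuel visited' (pos.1 + dir.1, pos.2 + dir.2) dir

def check_infinite_loop (grid : List (List String)) (start : Int × Int) : Bool :=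
  pvLoopA grid (pvLimit grid + 1) PySem.Set.empty start (-1, 0)

-- ===== PORT B =====
-- B's counted loop: scalars i j di dj, no visited set; `except IndexError` = the two
-- `none` branches; turning right is di, dj = dj, -di.
def pvLoopB (grid : List (List String)) : Nat → Int → Int → Int → Int → Bool
  | 0, _, _, _, _ => true  -- survived more steps than distinct states: a loop
  | n + 1, i, j, di, dj =>
    match PySem.List.pyGet? grid (i + di) with
    | none => false
    | some row =>
      match PySem.List.pyGet? row (j + dj) with
      | none => false
      | some cell =>
        if cell = "#" ∨ cell = "O" then pvLoopB grid n i j dj (-di)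
        else pvLoopB grid n (i + di) (j + dj) di dj

def check_infinite_loop_alt (grid : List (List String)) (start : Int × Int) : Bool :=
  pvLoopB grid (pvLimit grid) start.1 start.2 (-1) 0

-- ===== PRECONDITION & SPEC =====
def Spec_check_infinite_loop (grid : List (List String)) (start : Int × Int) (out : Bool) : Prop := out = check_infinite_loop_alt grid start
instance (grid : List (List String)) (start : Int × Int) (out : Bool) : Decidable (Spec_check_infinite_loop grid start out) := by unfold Spec_check_infinite_loop; infer_instance

-- ===== CLAIM (what is proved, stated in full; the proofs are below) =====
def Claim_equal_check_infinite_loop : Prop := ∀ (grid : List (List String)) (start : Int × Int), Dom_check_infinite_loop grid start → Spec_check_infinite_loop grid start (check_infinite_loop grid start)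

-- ===== LEMMAS AND PROOFS =====

-- The guard's one-step transition (the common semantics of both loop bodies).
def pvStep (grid : List (List String)) (s : (Int × Int) × (Int × Int)) :
    Option ((Int × Int) × (Int × Int)) :=
  match PySem.List.pyGet? grid (s.1.1 + s.2.1) with
  | none => none
  | some row =>
    match PySem.List.pyGet? row (s.1.2 + s.2.2) with
    | none => none
    | some cell =>
      if cell = "#" ∨ cell = "O" then some (s.1, (s.2.2, -s.2.1))
      else some ((s.1.1 + s.2.1, s.1.2 + s.2.2), s.2)

def pvIter (grid : List (List String)) : Nat → (Int × Int) × (Int × Int) → Option ((Int × Int) × (Int × Int))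
  | 0, s => some s
  | n + 1, s =>
    match pvStep grid s with
    | none => none
    | some t => pvIter grid n t

lemma pvIter_add (grid : List (List String)) (a b : Nat) (s : (Int × Int) × (Int × Int)) :
    pvIter grid (a + b) s =
      match pvIter grid a s with
      | none => none
      | some t => pvIter grid b t := by
  induction a generalizing s with
  | zero => simp [pvIter]
  | succ a ih =>
    have : a + 1 + b = (a + b) + 1 := by omega
    rw [this]
    show (match pvStep grid s with
          | none => none
          | some t => pvIter grid (a + b) t) = _
    cases h : pvStep grid s with
    | none => simp [pvIter, h]
    | some t => simp only [pvIter, h]; exact ih t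

lemma pvIter_isSome_mono (grid : List (List String)) {m n : Nat} {s : (Int × Int) × (Int × Int)}
    (hmn : m ≤ n) (h : (pvIter grid n s).isSome) : (pvIter grid m s).isSome := by
  have hn : n = m + (n - m) := by omega
  rw [hn, pvIter_add] at h
  cases hm : pvIter grid m s with
  | none => rw [hm] at h; simp at h
  | some t => simp

lemma pvIter_none_mono (grid : List (List String)) {m n : Nat} {s : (Int × Int) × (Int × Int)}
    (hmn : m ≤ n) (h : pvIter grid m s = none) : pvIter grid n s = none := by
  have hn : n = m + (n - m) := by omega
  rw [hn, pvIter_add, h]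

lemma pvIter_succ_right (grid : List (List String)) (n : Nat) (s : (Int × Int) × (Int × Int)) :
    pvIter grid (n + 1) s =
      match pvIter grid n s with
      | none => none
      | some t => pvStep grid t := by
  rw [pvIter_add]
  cases h : pvIter grid n s with
  | none => rfl
  | some t => show pvIter grid 1 t = _; cases ht : pvStep grid t <;> simp [pvIter, ht]

-- a repeated state makes the orbit eternal
lemma pvAlive_of_repeat (grid : List (List String)) {j k : Nat} {s0 t : (Int × Int) × (Int × Int)}
    (hj : pvIter grid j s0 = some t) (hk : pvIter grid k s0 = some t) (hjk : j < k) :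
    ∀ n, (pvIter grid n s0).isSome := by
  have hshift : ∀ r, pvIter grid (j + r) s0 = pvIter grid (k + r) s0 := by
    intro r
    rw [pvIter_add, pvIter_add, hj, hk]
  intro n
  induction n using Nat.strong_induction_on with
  | _ n ih =>
    by_cases hn : n ≤ k
    · exact pvIter_isSome_mono grid hn (by rw [hk]; rfl)
    · have h1 : n = k + (n - k) := by omega
      have h2 := (hshift (n - k)).symm
      rw [h1, h2]
      exact ih (j + (n - k)) (by omega)

-- the finite state space: positions are the start plus the in-grid box, 4 directions
def pvDirsF : Finset (Int × Int) := {(-1, 0), (0, 1), (1, 0), (0, -1)}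

noncomputable def pvStates (grid : List (List String)) (p0 : Int × Int) : Finset ((Int × Int) × (Int × Int)) :=
  (insert p0 (Finset.Icc (-(grid.length : Int)) ((grid.length : Int) - 1) ×ˢ
    Finset.Icc (-(pvCols grid : Int)) ((pvCols grid : Int) - 1))) ×ˢ pvDirsF

lemma pvStep_closed (grid : List (List String)) (p0 : Int × Int)
    {s s' : (Int × Int) × (Int × Int)} (hs : s ∈ pvStates grid p0)
    (hstep : pvStep grid s = some s') : s' ∈ pvStates grid p0 := by
  obtain ⟨hp, hd⟩ := Finset.mem_product.mp hs
  unfold pvStep at hstep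
  cases hrow : PySem.List.pyGet? grid (s.1.1 + s.2.1) with
  | none => rw [hrow] at hstep; exact absurd hstep (by simp)
  | some row =>
    rw [hrow] at hstep
    dsimp only at hstep
    cases hcell : PySem.List.pyGet? row (s.1.2 + s.2.2) with
    | none => rw [hcell] at hstep; exact absurd hstep (by simp)
    | some cell =>
      rw [hcell] at hstep
      dsimp only at hstep
      by_cases hb : cell = "#" ∨ cell = "O"
      · simp only [if_pos hb, Option.some.injEq] at hstep
        subst hstep
        apply Finset.mem_product.mpr
        refine ⟨hp, ?_⟩
        simp only [pvDirsF, Finset.mem_insert, Finset.mem_singleton] at hd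
        rcases hd with h | h | h | h <;> rw [h] <;> simp [pvDirsF]
      · simp only [if_neg hb, Option.some.injEq] at hstep
        subst hstep
        apply Finset.mem_product.mpr
        refine ⟨?_, hd⟩
        have hrowIn : ¬ PySem.List.pyGet? grid (s.1.1 + s.2.1) = none := by rw [hrow]; simp
        rw [PySem.List.pyGet?_eq_none_iff] at hrowIn
        have hri : PySem.Raise.InRange grid.length (s.1.1 + s.2.1) := not_not.mp hrowIn
        have hcellIn : ¬ PySem.List.pyGet? row (s.1.2 + s.2.2) = none := by rw [hcell]; simp
        rw [PySem.List.pyGet?_eq_none_iff] at hcellIn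
        have hrj : PySem.Raise.InRange row.length (s.1.2 + s.2.2) := not_not.mp hcellIn
        have hrowMem : row ∈ grid := PySem.List.mem_of_pyGet?_eq_some grid hrow
        have hlen : row.length ≤ pvCols grid := by
          have := (PySem.List.le_foldl_max (grid.map List.length) 0).2 row.length
            (List.mem_map_of_mem hrowMem)
          simpa [pvCols] using this
        obtain ⟨h1, h2⟩ := hri
        obtain ⟨h3, h4⟩ := hrj
        apply Finset.mem_insert_of_mem
        apply Finset.mem_product.mpr
        constructor
        · simp only [Finset.mem_Icc]; omega
        · simp only [Finset.mem_Icc]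
          constructor <;> [skip; omega]
          have : -(row.length : Int) ≥ -(pvCols grid : Int) := by omega
          omega

lemma pvIter_mem (grid : List (List String)) (p0 : Int × Int)
    {s0 : (Int × Int) × (Int × Int)} (h0 : s0 ∈ pvStates grid p0) :
    ∀ n x, pvIter grid n s0 = some x → x ∈ pvStates grid p0 := by
  intro n
  induction n generalizing s0 with
  | zero => intro x hx; simp [pvIter] at hx; subst hx; exact h0
  | succ n ih =>
    intro x hx
    unfold pvIter at hx
    cases ht : pvStep grid s0 with
    | none => rw [ht] at hx; exact absurd hx (by simp)
    | some t =>
      rw [ht] at hx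
      exact ih (pvStep_closed grid p0 h0 ht) x hx

lemma pvStates_card_lt (grid : List (List String)) (p0 : Int × Int) :
    (pvStates grid p0).card < pvLimit grid := by
  have hdirs : pvDirsF.card ≤ 4 := by decide
  have hcard : (pvStates grid p0).card ≤
      ((Finset.Icc (-(grid.length : Int)) ((grid.length : Int) - 1) ×ˢ
        Finset.Icc (-(pvCols grid : Int)) ((pvCols grid : Int) - 1)).card + 1) * 4 := by
    unfold pvStates
    rw [Finset.card_product]
    exact Nat.mul_le_mul (Finset.card_insert_le _ _) hdirs
  rw [Finset.card_product, Int.card_Icc, Int.card_Icc] at hcard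
  have h1 : ((grid.length : Int) - 1 + 1 - -(grid.length : Int)).toNat = 2 * grid.length := by
    omega
  have h2 : ((pvCols grid : Int) - 1 + 1 - -(pvCols grid : Int)).toNat = 2 * pvCols grid := by
    omega
  rw [h1, h2] at hcard
  unfold pvLimit
  have hexp : 4 * (2 * grid.length + 1) * (2 * pvCols grid + 1) =
      (2 * grid.length * (2 * pvCols grid) + 1) * 4 + 8 * grid.length + 8 * pvCols grid := by
    ring
  omega

-- pigeonhole: k+1 pairwise-distinct live orbit states fit in the state space
lemma pvPigeon (grid : List (List String)) (p0 : Int × Int)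
    {s0 : (Int × Int) × (Int × Int)} (h0 : s0 ∈ pvStates grid p0) (k : Nat)
    (hlive : (pvIter grid k s0).isSome)
    (hdist : ∀ m1 m2 x, m1 < m2 → m2 ≤ k → pvIter grid m1 s0 = some x →
      pvIter grid m2 s0 ≠ some x) :
    k + 1 ≤ (pvStates grid p0).card := by
  have hsome : ∀ m ∈ Finset.range (k + 1), (pvIter grid m s0).isSome := by
    intro m hm
    rw [Finset.mem_range] at hm
    exact pvIter_isSome_mono grid (by omega) hlive
  have := Finset.card_le_card_of_injOn (s := Finset.range (k + 1)) (t := pvStates grid p0)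
    (fun m => (pvIter grid m s0).getD s0) ?_ ?_
  · simpa using this
  · intro m hm
    simp only [Finset.mem_coe] at hm
    have h := hsome m hm
    cases hx : pvIter grid m s0 with
    | none => rw [hx] at h; simp at h
    | some x =>
      simp only [hx, Option.getD_some]
      exact pvIter_mem grid p0 h0 m x hx
  · intro m1 hm1 m2 hm2 heq
    simp only [Finset.mem_coe, Finset.mem_range] at hm1 hm2
    by_contra hne
    rcases Nat.lt_or_ge m1 m2 with hlt | hge
    · cases hx1 : pvIter grid m1 s0 with
      | none => have := hsome m1 (by simpa using hm1); rw [hx1] at this; simp at this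
      | some x1 =>
        cases hx2 : pvIter grid m2 s0 with
        | none => have := hsome m2 (by simpa using hm2); rw [hx2] at this; simp at this
        | some x2 =>
          simp only [hx1, hx2, Option.getD_some] at heq
          exact hdist m1 m2 x1 hlt (by omega) hx1 (by rw [hx2, heq])
    · have hlt : m2 < m1 := by omega
      cases hx1 : pvIter grid m1 s0 with
      | none => have := hsome m1 (by simpa using hm1); rw [hx1] at this; simp at this
      | some x1 =>
        cases hx2 : pvIter grid m2 s0 with
        | none => have := hsome m2 (by simpa using hm2); rw [hx2] at this; simp at this
        | some x2 =>
          simp only [hx1, hx2, Option.getD_some] at heq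
          exact hdist m2 m1 x2 hlt (by omega) hx2 (by rw [hx1, heq])

-- B's loop is exactly "the orbit survives n steps"
lemma pvLoopB_eq (grid : List (List String)) :
    ∀ (n : Nat) (i j di dj : Int),
      pvLoopB grid n i j di dj = (pvIter grid n ((i, j), (di, dj))).isSome := by
  intro n
  induction n with
  | zero => intro i j di dj; simp [pvLoopB, pvIter]
  | succ n ih =>
    intro i j di dj
    show (match PySem.List.pyGet? grid (i + di) with
          | none => false
          | some row =>
            match PySem.List.pyGet? row (j + dj) with
            | none => false
            | some cell =>
              if cell = "#" ∨ cell = "O" then pvLoopB grid n i j dj (-di)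
              else pvLoopB grid n (i + di) (j + dj) di dj) = _
    unfold pvIter pvStep
    cases hrow : PySem.List.pyGet? grid (i + di) with
    | none => simp
    | some row =>
      dsimp only
      cases hcell : PySem.List.pyGet? row (j + dj) with
      | none => simp
      | some cell =>
        dsimp only
        by_cases hb : cell = "#" ∨ cell = "O"
        · rw [if_pos hb, if_pos hb]; exact ih i j dj (-di)
        · rw [if_neg hb, if_neg hb]; exact ih (i + di) (j + dj) di dj

-- on direction vectors actually in play, A's cycle successor is B's right turn
lemma pvNextDir_eq {d : Int × Int} (hd : d ∈ pvDirsF) : pvNextDir d = (d.2, -d.1) := by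
  simp only [pvDirsF, Finset.mem_insert, Finset.mem_singleton] at hd
  rcases hd with h | h | h | h <;> subst h <;> decide

-- main invariant for A's loop
lemma pvLoopA_eq (grid : List (List String)) (p0 : Int × Int) :
    ∀ (fuel k : Nat) (s : (Int × Int) × (Int × Int)) (visited : PySem.Set ((Int × Int) × (Int × Int))),
      pvIter grid k (p0, (-1, 0)) = some s →
      (∀ x, x ∈ visited ↔ ∃ m, m < k ∧ pvIter grid m (p0, (-1, 0)) = some x) →
      (∀ m1 m2 x, m1 < m2 → m2 < k → pvIter grid m1 (p0, (-1, 0)) = some x →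
        pvIter grid m2 (p0, (-1, 0)) ≠ some x) →
      pvLimit grid + 1 ≤ fuel + k →
      pvLoopA grid fuel visited s.1 s.2 = (pvIter grid (pvLimit grid) (p0, (-1, 0))).isSome := by
  intro fuel
  have hs0mem : (p0, ((-1 : Int), (0 : Int))) ∈ pvStates grid p0 := by
    apply Finset.mem_product.mpr
    exact ⟨Finset.mem_insert_self _ _, by simp [pvDirsF]⟩
  induction fuel with
  | zero =>
    intro k s visited h1 _ _ h4
    have : (pvIter grid (pvLimit grid) (p0, (-1, 0))).isSome :=
      pvIter_isSome_mono grid (show pvLimit grid ≤ k by omega) (by rw [h1]; rfl)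
    simp [pvLoopA, this]
  | succ fuel ih =>
    intro k s visited h1 h2 h3 h4
    have hcont : PySem.Set.contains visited (s.1, s.2) = PySem.Set.contains visited s := by
      rfl
    show (if PySem.Set.contains visited (s.1, s.2) then true else _) = _
    by_cases hmem : s ∈ visited
    · -- a state repeats: the orbit is eternal, both sides are true
      rw [if_pos (by rw [hcont]; exact List.elem_eq_true_of_mem hmem)]
      obtain ⟨m, hm, hms⟩ := (h2 s).mp hmem
      have := pvAlive_of_repeat grid hms h1 hm (pvLimit grid)
      simp [this]
    · rw [if_neg (by rw [hcont]; simp only [PySem.Set.contains]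
                     exact fun hc => hmem (List.mem_of_elem_eq_true hc))]
      -- distinctness now extends to m2 ≤ k
      have h3' : ∀ m1 m2 x, m1 < m2 → m2 ≤ k → pvIter grid m1 (p0, (-1, 0)) = some x →
          pvIter grid m2 (p0, (-1, 0)) ≠ some x := by
        intro m1 m2 x hlt hle hx1 hx2
        rcases Nat.lt_or_ge m2 k with hk | hk
        · exact h3 m1 m2 x hlt hk hx1 hx2
        · have hm2k : m2 = k := by omega
          subst hm2k
          rw [h1] at hx2
          injection hx2 with hsx
          exact hmem (by rw [hsx]; exact (h2 x).mpr ⟨m1, by omega, hx1⟩)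
      have hk1 : k + 1 ≤ pvLimit grid := by
        have := pvPigeon grid p0 hs0mem k (by rw [h1]; rfl) h3'
        have := pvStates_card_lt grid p0
        omega
      have hmemS : s ∈ pvStates grid p0 := pvIter_mem grid p0 hs0mem k s h1
      have hdmem : s.2 ∈ pvDirsF := (Finset.mem_product.mp hmemS).2
      -- the loop body follows pvStep
      have hvis' : ∀ x, x ∈ PySem.Set.add visited (s.1, s.2) ↔
          ∃ m, m < k + 1 ∧ pvIter grid m (p0, (-1, 0)) = some x := by
        intro x
        rw [show ((s.1, s.2) : (Int × Int) × (Int × Int)) = s from rfl,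
            PySem.Set.mem_add visited s x]
        constructor
        · rintro (hx | rfl)
          · obtain ⟨m, hm, hmx⟩ := (h2 x).mp hx; exact ⟨m, by omega, hmx⟩
          · exact ⟨k, by omega, h1⟩
        · rintro ⟨m, hm, hmx⟩
          rcases Nat.lt_or_ge m k with hk | hk
          · exact Or.inl ((h2 x).mpr ⟨m, hk, hmx⟩)
          · have : m = k := by omega
            subst this
            rw [h1] at hmx
            injection hmx with hsx
            exact Or.inr hsx.symm
      have hnext : ∀ s', pvStep grid s = some s' →
          pvIter grid (k + 1) (p0, (-1, 0)) = some s' := by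
        intro s' hstep
        rw [pvIter_succ_right, h1]
        exact hstep
      have h3'' : ∀ s', pvStep grid s = some s' →
          (∀ m1 m2 x, m1 < m2 → m2 < k + 1 → pvIter grid m1 (p0, (-1, 0)) = some x →
            pvIter grid m2 (p0, (-1, 0)) ≠ some x) := by
        intro s' _ m1 m2 x hlt hle hx1 hx2
        exact h3' m1 m2 x hlt (by omega) hx1 hx2
      dsimp only
      cases hrow : PySem.List.pyGet? grid (s.1.1 + s.2.1) with
      | none =>
        -- the guard exits: the orbit dies at step k+1 ≤ pvLimit
        have hdead : pvIter grid (k + 1) (p0, (-1, 0)) = none := by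
          rw [pvIter_succ_right, h1]
          show pvStep grid s = none
          unfold pvStep
          rw [hrow]
        have hfin := pvIter_none_mono grid hk1 hdead
        simp [hfin]
      | some row =>
        dsimp only
        cases hcell : PySem.List.pyGet? row (s.1.2 + s.2.2) with
        | none =>
          have hdead : pvIter grid (k + 1) (p0, (-1, 0)) = none := by
            rw [pvIter_succ_right, h1]
            show pvStep grid s = none
            unfold pvStep
            rw [hrow]
            dsimp only
            rw [hcell]
          have hfin := pvIter_none_mono grid hk1 hdead
          simp [hfin]
        | some cell =>
          dsimp only
          by_cases hb : cell = "#" ∨ cell = "O"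
          · -- turn
            have hstep : pvStep grid s = some (s.1, (s.2.2, -s.2.1)) := by
              unfold pvStep
              rw [hrow]
              dsimp only
              rw [hcell]
              dsimp only
              rw [if_pos hb]
            rw [if_pos hb]
            have := ih (k + 1) (s.1, (s.2.2, -s.2.1)) (PySem.Set.add visited (s.1, s.2))
              (hnext _ hstep) hvis' (h3'' _ hstep) (by omega)
            rw [pvNextDir_eq hdmem]
            exact this
          · -- move
            have hstep : pvStep grid s = some ((s.1.1 + s.2.1, s.1.2 + s.2.2), s.2) := by
              unfold pvStep
              rw [hrow]
              dsimp only
              rw [hcell]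
              dsimp only
              rw [if_neg hb]
            rw [if_neg hb]
            exact ih (k + 1) ((s.1.1 + s.2.1, s.1.2 + s.2.2), s.2)
              (PySem.Set.add visited (s.1, s.2)) (hnext _ hstep) hvis' (h3'' _ hstep) (by omega)

-- ===== VERDICT (by name: the statement is the Claim_ definition above) =====
theorem check_infinite_loop_spec : Claim_equal_check_infinite_loop := by
  intro grid start _
  unfold Spec_check_infinite_loop check_infinite_loop check_infinite_loop_alt
  rw [pvLoopB_eq grid (pvLimit grid) start.1 start.2 (-1) 0]
  have := pvLoopA_eq grid start (pvLimit grid + 1) 0 (start, (-1, 0)) PySem.Set.empty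
    rfl (by intro x; constructor
            · intro hx; exact absurd hx (by simp [PySem.Set.empty])
            · rintro ⟨m, hm, _⟩; omega)
    (by intro m1 m2 x _ h2 _; omega) (by omega)
  simpa using this
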